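-- pv_equiv track=rewrite | github.com/nguyenphanvn95/EditAudioinexternaleditor | __init__.py | getFieldInTemplate
-- ===== SOURCE A (Python) =====
-- def getFieldInTemplate(tmpl):
--     fields = []
--     start = 0
--     while True:
--         s = tmpl.find('{{', start)
--         if s == -1: break
--         e = tmpl.find('}}', s)
--         if e != -1:
--             fields.append(tmpl[s + 2:e][:])
--             start = e + 2
--         else: break
--     return fields
-- ===== SOURCE B (Python) =====
-- def getFieldInTemplate(tmpl):
--     fields = []
--     buf = None  # None = outside a field; list of chars while inside one
--     i = 0
--     n = len(tmpl)
--     while i < n: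
--         if buf is None:
--             if tmpl[i] == '{' and i + 1 < n and tmpl[i + 1] == '{':
--                 buf = []
--                 i += 2
--             else:
--                 i += 1
--         else:
--             if tmpl[i] == '}' and i + 1 < n and tmpl[i + 1] == '}':
--                 fields.append(''.join(buf))
--                 buf = None
--                 i += 2
--             else:
--                 buf.append(tmpl[i])
--                 i += 1
--     return fields
-- ===== Notes on version B (the rewrite author's own statement) =====
-- stated objective: alternative
-- what changed: A repeatedly calls str.find for the opening and then the closing double-brace marker and slices each field out; B makes a single left-to-right pass with a two-state character automaton (outside/inside a field) and an explicit buffer, never searching or slicing.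
import Mathlib
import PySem

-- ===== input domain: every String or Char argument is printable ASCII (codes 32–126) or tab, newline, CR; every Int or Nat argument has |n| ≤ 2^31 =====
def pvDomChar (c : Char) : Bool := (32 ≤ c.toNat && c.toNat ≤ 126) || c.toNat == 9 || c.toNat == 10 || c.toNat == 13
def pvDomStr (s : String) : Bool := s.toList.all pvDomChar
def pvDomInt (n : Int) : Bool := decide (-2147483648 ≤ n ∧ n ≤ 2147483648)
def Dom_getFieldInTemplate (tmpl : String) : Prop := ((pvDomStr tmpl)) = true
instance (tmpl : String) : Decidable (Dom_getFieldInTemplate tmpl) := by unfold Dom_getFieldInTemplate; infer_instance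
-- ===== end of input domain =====

-- B replaces A's repeated tmpl.find substring searches with a single left-to-right
-- character-automaton pass (objective: alternative; same behaviour, one linear scan).

-- ===== PORT A =====
-- A's 'while True' loop, ported with fuel = len+1 (start advances by ≥ 2 each iteration,
-- so the fuel is never exhausted; the fuel guard only makes the same computation total).
def pvLoopA (tmpl : List Char) (fields : List String) (start : Int) : Nat → List String
  | 0 => fields
  | fuel + 1 =>
    let s := PySem.Chars.findFrom tmpl ['{', '{'] start
    if s = -1 then fields
    else
      let e := PySem.Chars.findFrom tmpl ['}', '}'] s
      if e ≠ -1 then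
        pvLoopA tmpl (fields ++ [String.ofList (PySem.Chars.slice tmpl (some (s + 2)) (some e))]) (e + 2) fuel
      else fields

def getFieldInTemplate (tmpl : String) : List String :=
  pvLoopA tmpl.toList [] 0 (tmpl.toList.length + 1)

-- ===== PORT B =====
-- Source B's single-pass automaton: buf = none outside a field, some chars inside one;
-- 'i+1 < n and tmpl[i+1] == c' is read off the remainder as rest.head? = some c.
def pvRunB : List Char → Option (List Char) → List String → List String
  | [], _, fields => fields
  | c :: rest, none, fields =>
      if c = '{' ∧ rest.head? = some '{' then pvRunB rest.tail (some []) fields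
      else pvRunB rest none fields
  | c :: rest, some buf, fields =>
      if c = '}' ∧ rest.head? = some '}' then pvRunB rest.tail none (fields ++ [String.ofList buf])
      else pvRunB rest (some (buf ++ [c])) fields
  termination_by l _ _ => l.length
  decreasing_by
    all_goals simp [List.length_tail]

def getFieldInTemplate_alt (tmpl : String) : List String :=
  pvRunB tmpl.toList none []

-- ===== PRECONDITION & SPEC =====
def Spec_getFieldInTemplate (tmpl : String) (out : List String) : Prop := out = getFieldInTemplate_alt tmpl
instance (tmpl : String) (out : List String) : Decidable (Spec_getFieldInTemplate tmpl out) := by unfold Spec_getFieldInTemplate; infer_instance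

-- ===== CLAIM (what is proved, stated in full; the proofs are below) =====
def Claim_equal_getFieldInTemplate : Prop := ∀ (tmpl : String), Dom_getFieldInTemplate tmpl → Spec_getFieldInTemplate tmpl (getFieldInTemplate tmpl)

-- ===== LEMMAS AND PROOFS =====

-- In the 'outside' state, if '{{' occurs nowhere, the automaton emits nothing.
lemma pvRunB_no_open (l : List Char) (fields : List String)
    (h : ¬ (['{', '{'] <:+: l)) : pvRunB l none fields = fields := by
  induction l with
  | nil => simp [pvRunB]
  | cons c rest ih =>
    by_cases hc : c = '{' ∧ rest.head? = some '{'
    · exfalso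
      obtain ⟨hc1, hc2⟩ := hc
      rcases rest with _ | ⟨d, rs⟩ <;> simp_all
      exact h ⟨[], rs, by simp⟩
    · rw [pvRunB, if_neg hc]
      exact ih (fun h' => h (List.infix_cons h'))

-- In the 'outside' state, skipping to the first '{{' (at position j) enters the field state.
lemma pvRunB_to_open (j : Nat) (l : List Char) (fields : List String)
    (hmin : ∀ i, i < j → ¬ (['{', '{'] <+: l.drop i))
    (hj : ['{', '{'] <+: l.drop j) :
    pvRunB l none fields = pvRunB (l.drop (j + 2)) (some []) fields := by
  induction j generalizing l with
  | zero =>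
    obtain ⟨u, hu⟩ := hj
    simp only [List.drop_zero] at hu
    subst hu
    simp [pvRunB]
  | succ j ih =>
    rcases l with _ | ⟨c, rest⟩
    · simp at hj
    · have h0 : ¬ (['{', '{'] <+: (c :: rest)) := by
        simpa using hmin 0 (Nat.succ_pos j)
      have hc : ¬ (c = '{' ∧ rest.head? = some '{') := by
        rintro ⟨hc1, hc2⟩
        rcases rest with _ | ⟨d, rs⟩ <;> simp_all
      rw [pvRunB, if_neg hc]
      have := ih rest (fun i hi => by simpa using hmin (i + 1) (by omega)) (by simpa using hj)
      simpa using this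

-- In the 'inside' state, if '}}' never occurs the buffer is dropped.
lemma pvRunB_no_close (u : List Char) (b : List Char) (fields : List String)
    (h : ¬ (['}', '}'] <:+: u)) : pvRunB u (some b) fields = fields := by
  induction u generalizing b with
  | nil => simp [pvRunB]
  | cons c rest ih =>
    by_cases hc : c = '}' ∧ rest.head? = some '}'
    · exfalso
      obtain ⟨hc1, hc2⟩ := hc
      rcases rest with _ | ⟨d, rs⟩ <;> simp_all
      exact h ⟨[], rs, by simp⟩
    · rw [pvRunB, if_neg hc]
      exact ih _ (fun h' => h (List.infix_cons h'))

-- In the 'inside' state, the buffer closes at the first '}}' (at position m).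
lemma pvRunB_close (m : Nat) (u : List Char) (b : List Char) (fields : List String)
    (hmin : ∀ i, i < m → ¬ (['}', '}'] <+: u.drop i))
    (hm : ['}', '}'] <+: u.drop m) :
    pvRunB u (some b) fields
      = pvRunB (u.drop (m + 2)) none (fields ++ [String.ofList (b ++ u.take m)]) := by
  induction m generalizing u b with
  | zero =>
    obtain ⟨w, hw⟩ := hm
    simp only [List.drop_zero] at hw
    subst hw
    simp [pvRunB]
  | succ m ih =>
    rcases u with _ | ⟨c, rest⟩
    · simp at hm
    · have h0 : ¬ (['}', '}'] <+: (c :: rest)) := by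
        simpa using hmin 0 (Nat.succ_pos m)
      have hc : ¬ (c = '}' ∧ rest.head? = some '}') := by
        rintro ⟨hc1, hc2⟩
        rcases rest with _ | ⟨d, rs⟩ <;> simp_all
      rw [pvRunB, if_neg hc]
      have := ih rest (b ++ [c]) (fun i hi => by simpa using hmin (i + 1) (by omega)) (by simpa using hm)
      simpa [List.append_assoc] using this

-- first '}}' in '{{' ++ u is 2 + first '}}' in u.
lemma pv_find_close_cons2 (u : List Char) :
    PySem.Chars.find ('{' :: '{' :: u) ['}', '}']
      = if PySem.Chars.find u ['}', '}'] = -1 then -1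
        else 2 + PySem.Chars.find u ['}', '}'] := by
  split
  · next h =>
    rw [PySem.Chars.find_eq_neg_one_iff] at h ⊢
    intro hinf
    apply h
    rcases List.infix_cons_iff.mp hinf with hp | h2
    · simp [List.cons_prefix_cons] at hp
    rcases List.infix_cons_iff.mp h2 with hp | h3
    · simp [List.cons_prefix_cons] at hp
    exact h3
  · next h =>
    have hnn : 0 ≤ PySem.Chars.find u ['}', '}'] := by
      have := PySem.Chars.neg_one_le_find u ['}', '}']
      omega
    obtain ⟨hpre, hmin⟩ := PySem.Chars.find_spec hnn
    have hinfu : ['}', '}'] <:+: u :=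
      hpre.isInfix.trans (List.drop_suffix _ u).isInfix
    have hinf : ['}', '}'] <:+: ('{' :: '{' :: u) :=
      List.infix_cons (List.infix_cons hinfu)
    have hv : PySem.Chars.find ('{' :: '{' :: u) ['}', '}'] ≠ -1 :=
      (PySem.Chars.find_ne_neg_one_iff _ _).mpr hinf
    have hvnn : 0 ≤ PySem.Chars.find ('{' :: '{' :: u) ['}', '}'] := by
      have := PySem.Chars.neg_one_le_find ('{' :: '{' :: u) ['}', '}']
      omega
    obtain ⟨vpre, vmin⟩ := PySem.Chars.find_spec hvnn
    set v := (PySem.Chars.find ('{' :: '{' :: u) ['}', '}']).toNat with hvdef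
    set f := (PySem.Chars.find u ['}', '}']).toNat with hfdef
    have hv2 : 2 ≤ v := by
      by_contra hlt
      interval_cases v
      · simp [List.cons_prefix_cons] at vpre
      · simp [List.cons_prefix_cons] at vpre
    have hdropv : ('{' :: '{' :: u).drop v = u.drop (v - 2) := by
      obtain ⟨n, hn⟩ : ∃ n, v = n + 2 := ⟨v - 2, by omega⟩
      rw [hn]
      simp [List.drop_succ_cons]
    have hle : v ≤ 2 + f := by
      by_contra hgt
      have h2f : ('{' :: '{' :: u).drop (2 + f) = u.drop f := by
        have : 2 + f = f + 2 := by omega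
        rw [this]; simp [List.drop_succ_cons]
      exact (vmin (2 + f) (by omega)) (h2f ▸ hpre)
    have hge : 2 + f ≤ v := by
      rw [hdropv] at vpre
      by_contra hgt
      exact (hmin (v - 2) (by omega)) vpre
    omega

-- Main invariant: from position k with enough fuel, A's loop equals B's automaton on the rest.
lemma pv_main (fuel : Nat) (l : List Char) (k : Nat) (fields : List String)
    (hk : k ≤ l.length) (hf : l.length - k < fuel) :
    pvLoopA l fields (k : Int) fuel = pvRunB (l.drop k) none fields := by
  induction fuel generalizing k fields with
  | zero => omega
  | succ fuel ih =>
    have hrw := PySem.Chars.findFrom_natCast l ['{', '{'] k hk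
    by_cases h1 : PySem.Chars.find (l.drop k) ['{', '{'] = -1
    · rw [pvLoopA]
      simp only [hrw, h1, if_true]
      exact (pvRunB_no_open _ _ ((PySem.Chars.find_eq_neg_one_iff _ _).mp h1)).symm
    · have hjnn : 0 ≤ PySem.Chars.find (l.drop k) ['{', '{'] := by
        have := PySem.Chars.neg_one_le_find (l.drop k) ['{', '{']
        omega
      obtain ⟨jpre, jmin⟩ := PySem.Chars.find_spec hjnn
      set j := (PySem.Chars.find (l.drop k) ['{', '{']).toNat with hjdef
      have hjcast : PySem.Chars.find (l.drop k) ['{', '{'] = (j : Int) := by omega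
      obtain ⟨u, hu⟩ := jpre
      have hu' : '{' :: '{' :: u = (l.drop k).drop j := by simpa using hu
      have hj2 : j + 2 ≤ (l.drop k).length := by
        have hlu := congrArg List.length hu'
        rw [List.length_drop] at hlu
        simp only [List.length_cons] at hlu
        omega
      have hlen : (l.drop k).length = l.length - k := by simp
      have hkj : k + j ≤ l.length := by omega
      have hsval : PySem.Chars.findFrom l ['{', '{'] (k : Int) = (k : Int) + (j : Int) := by
        rw [hrw, hjcast, if_neg (by omega : ¬ ((j : Int) = -1))]
      have hcast : (k : Int) + (j : Int) = ((k + j : Nat) : Int) := by push_cast; ring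
      have hrw2 := PySem.Chars.findFrom_natCast l ['}', '}'] (k + j) hkj
      have hdropkj : l.drop (k + j) = '{' :: '{' :: u := by
        rw [← List.drop_drop, ← hu']
      have hfind2 : PySem.Chars.find (l.drop (k + j)) ['}', '}']
          = if PySem.Chars.find u ['}', '}'] = -1 then -1
            else 2 + PySem.Chars.find u ['}', '}'] := by
        rw [hdropkj, pv_find_close_cons2]
      have hdku : (l.drop k).drop (j + 2) = u := by
        rw [List.drop_drop, show k + (j + 2) = (k + j) + 2 by omega,
            ← List.drop_drop, hdropkj]
        rfl
      have hBopen : pvRunB (l.drop k) none fields = pvRunB u (some []) fields := by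
        rw [pvRunB_to_open j (l.drop k) fields jmin ⟨u, hu⟩, hdku]
      have hne : ¬ (((k : Int) + (j : Int)) = -1) := by omega
      by_cases h2 : PySem.Chars.find u ['}', '}'] = -1
      · have hfv : PySem.Chars.find (l.drop (k + j)) ['}', '}'] = -1 := by
          rw [hfind2, if_pos h2]
        have heval : PySem.Chars.findFrom l ['}', '}'] ((k : Int) + (j : Int)) = -1 := by
          rw [hcast, hrw2, hfv]
          simp
        rw [pvLoopA]
        simp only [hsval, heval, if_neg hne, ne_eq, not_true_eq_false, if_neg,
          not_false_eq_true]
        rw [hBopen]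
        exact (pvRunB_no_close _ _ _ ((PySem.Chars.find_eq_neg_one_iff _ _).mp h2)).symm
      · have hmnn : 0 ≤ PySem.Chars.find u ['}', '}'] := by
          have := PySem.Chars.neg_one_le_find u ['}', '}']
          omega
        obtain ⟨mpre, mmin⟩ := PySem.Chars.find_spec hmnn
        set m := (PySem.Chars.find u ['}', '}']).toNat with hmdef
        have hmcast : PySem.Chars.find u ['}', '}'] = (m : Int) := by omega
        have hm2 : m + 2 ≤ u.length := by
          have := mpre.length_le
          simp at this
          omega
        have hdropkj2 : l.drop (k + j + 2) = u := by
          rw [show k + j + 2 = k + (j + 2) by omega, ← List.drop_drop, hdku]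
        have hfv : PySem.Chars.find (l.drop (k + j)) ['}', '}'] = 2 + (m : Int) := by
          rw [hfind2, if_neg h2, hmcast]
        have heval : PySem.Chars.findFrom l ['}', '}'] ((k : Int) + (j : Int))
            = ((k + j + 2 + m : Nat) : Int) := by
          rw [hcast, hrw2, hfv, if_neg (by omega : ¬ ((2 : Int) + (m : Int) = -1))]
          push_cast; ring
        have hene : ((k + j + 2 + m : Nat) : Int) ≠ -1 := by omega
        rw [pvLoopA]
        simp only [hsval, heval, if_neg hne, ne_eq, hene, not_false_eq_true, if_pos]
        have hslice : PySem.Chars.slice l (some ((k : Int) + (j : Int) + 2))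
            (some ((k + j + 2 + m : Nat) : Int)) = u.take m := by
          rw [show (k : Int) + (j : Int) + 2 = ((k + j + 2 : Nat) : Int) by push_cast; ring]
          rw [PySem.Chars.slice_eq_listSlice, PySem.List.slice_natCast, hdropkj2]
          congr 1
          omega
        have hul : u.length = l.length - (k + j + 2) := by
          rw [← hdropkj2]; simp
        rw [hslice]
        rw [show ((k + j + 2 + m : Nat) : Int) + 2 = ((k + j + m + 4 : Nat) : Int) by push_cast; ring]
        rw [ih (k + j + m + 4) _ (by omega) (by omega)]
        have hdrop' : l.drop (k + j + m + 4) = u.drop (m + 2) := by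
          rw [show k + j + m + 4 = (k + j + 2) + (m + 2) by omega, ← List.drop_drop, hdropkj2]
        rw [hdrop', hBopen, pvRunB_close m u [] fields mmin mpre]
        simp

-- ===== VERDICT (by name: the statement is the Claim_ definition above) =====
theorem getFieldInTemplate_spec : Claim_equal_getFieldInTemplate := by
  intro tmpl _
  unfold Spec_getFieldInTemplate getFieldInTemplate getFieldInTemplate_alt
  have := pv_main (tmpl.toList.length + 1) tmpl.toList 0 [] (by omega) (by omega)
  simpa using this
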